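-- pv_equiv track=rewrite | github.com/ChadBojelador/Alitaptap | services/api_fastapi/app/services/ai_validator.py | _heuristic_check
-- ===== SOURCE A (Python) =====
-- def _heuristic_check(title: str, description: str) -> bool:
--     """Basic heuristic validation."""
--     if not title or len(title.strip()) < 1:
--         return False
--     if not description or len(description.strip()) < 1:
--         return False
--     if len(title) > 200 or len(description) > 5000:
--         return False
--     spam_keywords = [
--         'viagra', 'casino', 'lottery', 'click here', 'buy now',
--         'free money', 'make money fast', 'work from home', 'earn cash',
--         'weight loss', 'diet pills', 'crypto investment', 'bitcoin',
--         'xxx', 'porn', 'sex', 'nude', 'naked',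
--         'hack', 'crack', 'pirate', 'warez', 'keygen',
--         'nigger', 'faggot', 'retard', 'kys', 'kill yourself',
--     ]
--     combined = (title + " " + description).lower()
--     if any(keyword in combined for keyword in spam_keywords):
--         return False
--     return True
-- ===== SOURCE B (Python) =====
-- _SPAM_KEYWORDS = [
--     'viagra', 'casino', 'lottery', 'click here', 'buy now',
--     'free money', 'make money fast', 'work from home', 'earn cash',
--     'weight loss', 'diet pills', 'crypto investment', 'bitcoin',
--     'xxx', 'porn', 'sex', 'nude', 'naked',
--     'hack', 'crack', 'pirate', 'warez', 'keygen',
--     'nigger', 'faggot', 'retard', 'kys', 'kill yourself',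
-- ]
--
-- # First-letter index built once: maps a character to the tails of the keywords
-- # that start with it; at scan time one dict lookup replaces the 28-keyword scan.
-- _BUCKETS = {}
-- for _kw in _SPAM_KEYWORDS:
--     _BUCKETS.setdefault(_kw[0], []).append(_kw[1:])
--
--
-- def _heuristic_check(title: str, description: str) -> bool:
--     """Basic heuristic validation (first-letter-indexed single scan)."""
--     if not title.strip() or not description.strip():
--         return False
--     if len(title) > 200 or len(description) > 5000:
--         return False
--     combined = (title + " " + description).lower()
--     for i, ch in enumerate(combined):
--         for tail in _BUCKETS.get(ch, ()):
--             if combined.startswith(tail, i + 1):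
--                 return False
--     return True
-- ===== Notes on version B (the rewrite author's own statement) =====
-- stated objective: alternative
-- what changed: A first-letter index (a dict from initial character to the tails of the keywords starting with it) is built once at module load; the scan then walks the combined text once and at each position does a single dict lookup plus prefix checks against that small bucket, so the per-position 28-keyword inner scan of A disappears; the two emptiness guards are merged into strip-based tests.
import Mathlib
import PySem

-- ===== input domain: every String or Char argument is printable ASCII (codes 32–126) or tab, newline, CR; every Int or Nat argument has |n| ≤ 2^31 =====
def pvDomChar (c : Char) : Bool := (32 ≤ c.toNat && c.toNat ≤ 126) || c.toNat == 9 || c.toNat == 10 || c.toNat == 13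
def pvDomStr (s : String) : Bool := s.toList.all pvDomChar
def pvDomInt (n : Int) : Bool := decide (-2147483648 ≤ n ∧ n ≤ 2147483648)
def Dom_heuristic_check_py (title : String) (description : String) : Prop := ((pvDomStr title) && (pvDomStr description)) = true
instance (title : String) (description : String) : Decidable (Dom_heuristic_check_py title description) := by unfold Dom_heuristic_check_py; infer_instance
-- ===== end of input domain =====

-- B builds a first-letter index (dict: initial char -> tails of the keywords starting
-- with it) once, then scans the combined text once, doing one bucket lookup per
-- position instead of A's 28 whole-text substring searches (objective: alternative).

-- shared constant table (data only): the spam keyword list of the Python module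
def spamKeywords : List (List Char) :=
  ["viagra".toList, "casino".toList, "lottery".toList, "click here".toList, "buy now".toList,
   "free money".toList, "make money fast".toList, "work from home".toList, "earn cash".toList,
   "weight loss".toList, "diet pills".toList, "crypto investment".toList, "bitcoin".toList,
   "xxx".toList, "porn".toList, "sex".toList, "nude".toList, "naked".toList,
   "hack".toList, "crack".toList, "pirate".toList, "warez".toList, "keygen".toList,
   "nigger".toList, "faggot".toList, "retard".toList, "kys".toList, "kill yourself".toList]

-- ===== PORT A =====
def heuristic_check_py (title : String) (description : String) : Bool :=
  -- 'not title' is emptiness; lengths and text ops via PySem.Chars on .toList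
  if title.toList == [] || PySem.Chars.len (PySem.Chars.strip title.toList) < 1 then false
  else if description.toList == [] || PySem.Chars.len (PySem.Chars.strip description.toList) < 1 then false
  else if PySem.Chars.len title.toList > 200 || PySem.Chars.len description.toList > 5000 then false
  else
    -- combined = (title + " " + description).lower()
    if spamKeywords.any (fun k =>
        PySem.Chars.isIn k (PySem.Chars.lower (title.toList ++ ' ' :: description.toList))) then false
    else true

-- ===== PORT B =====
-- module-level loop `_BUCKETS.setdefault(_kw[0], []).append(_kw[1:])`:
-- d[k[0]] = d.get(k[0], []) + [k[1:]]  (every keyword is nonempty; headD is its k[0])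
def spamBuckets : PySem.Dict Char (List (List Char)) :=
  spamKeywords.foldl (fun d kw => d.modify (kw.headD ' ') [] (· ++ [kw.tail])) PySem.Dict.empty

-- 'for i, ch in enumerate(combined): for tail in _BUCKETS.get(ch, ()): combined.startswith(tail, i+1)'
-- as structural recursion over the suffixes of combined (ch = head, rest = text after i)
def scanBuckets : List Char → Bool
  | [] => false
  | c :: rest =>
      (spamBuckets.getD c []).any (fun t => PySem.Chars.startswith rest t) || scanBuckets rest

def heuristic_check_py_alt (title : String) (description : String) : Bool :=
  if PySem.Chars.strip title.toList == [] || PySem.Chars.strip description.toList == [] then false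
  else if PySem.Chars.len title.toList > 200 || PySem.Chars.len description.toList > 5000 then false
  else
    !(scanBuckets (PySem.Chars.lower (title.toList ++ ' ' :: description.toList)))

-- ===== PRECONDITION & SPEC =====
def Spec_heuristic_check_py (title : String) (description : String) (out : Bool) : Prop := out = heuristic_check_py_alt title description
instance (title : String) (description : String) (out : Bool) : Decidable (Spec_heuristic_check_py title description out) := by unfold Spec_heuristic_check_py; infer_instance

-- ===== CLAIM (what is proved, stated in full; the proofs are below) =====
def Claim_equal_heuristic_check_py : Prop := ∀ (title : String) (description : String), Dom_heuristic_check_py title description → Spec_heuristic_check_py title description (heuristic_check_py title description)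

-- ===== LEMMAS AND PROOFS =====

lemma spam_ne_nil : ∀ k ∈ spamKeywords, k ≠ [] := by decide

-- A's pair of emptiness tests on a string collapses to emptiness of its strip
lemma guard_eq (l : List Char) :
    ((l == []) || decide (PySem.Chars.len (PySem.Chars.strip l) < 1))
      = (PySem.Chars.strip l == []) := by
  cases l with
  | nil => rfl
  | cons c t =>
      simp [PySem.Chars.len_eq, List.length_eq_zero_iff]
      cases h : PySem.Chars.strip (c :: t) <;> simp

-- what the bucket-building fold stores under key c: the tails of the keywords starting with c
lemma spamBuckets_getD (c : Char) :
    spamBuckets.getD c []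
      = ((spamKeywords.map (fun k => (k.headD ' ', k.tail))).filter (fun p => p.1 == c)).map (·.2) := by
  unfold spamBuckets
  have h := PySem.Dict.getD_foldl_modify_append
      (l := spamKeywords.map (fun k => ((k.headD ' ' : Char), k.tail)))
      (d := (PySem.Dict.empty : PySem.Dict Char (List (List Char)))) (c := c)
  rw [List.foldl_map] at h
  simpa [PySem.Dict.getD_empty] using h

-- bucket lookup + tail prefix checks = whole-keyword prefix checks at this position
lemma bucket_any (kws : List (List Char)) (hne : ∀ k ∈ kws, k ≠ []) (c : Char) (rest : List Char) :
    ((((kws.map (fun k => (k.headD ' ', k.tail))).filter (fun p => p.1 == c)).map (·.2)).any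
        (fun t => PySem.Chars.startswith rest t))
      = kws.any (fun k => PySem.Chars.startswith (c :: rest) k) := by
  induction kws with
  | nil => rfl
  | cons k ks ih =>
      have hk : k ≠ [] := hne k (by simp)
      obtain ⟨a, t, rfl⟩ : ∃ a t, k = a :: t := by
        cases k with | nil => exact absurd rfl hk | cons a t => exact ⟨a, t, rfl⟩
      have ih' := ih (fun k hk => hne k (by simp [hk]))
      rw [List.map_cons]
      by_cases hac : a = c
      · subst hac
        have hpos : ((fun (p : Char × List Char) => p.1 == a) (((a :: t).headD ' '), (a :: t).tail)) = true := by
          simp [List.headD]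
        rw [List.filter_cons, if_pos hpos, List.map_cons, List.any_cons, ih']
        have hhead : PySem.Chars.startswith rest ((a :: t).tail)
            = PySem.Chars.startswith (a :: rest) (a :: t) := by
          simp [PySem.Chars.startswith, List.isPrefixOf]
        rw [hhead, List.any_cons]
      · have hneg : ((fun (p : Char × List Char) => p.1 == c) (((a :: t).headD ' '), (a :: t).tail)) = false := by
          simp [List.headD, hac]
        rw [List.filter_cons, if_neg (by simp [List.headD, hac]), ih', List.any_cons]
        have hhead : PySem.Chars.startswith (c :: rest) (a :: t) = false := by
          simp [PySem.Chars.startswith, List.isPrefixOf, hac]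
        rw [hhead, Bool.false_or]

-- the bucket scan finds exactly the keywords occurring as infixes
lemma scanBuckets_iff (s : List Char) : scanBuckets s = true ↔ ∃ k ∈ spamKeywords, k <:+: s := by
  induction s with
  | nil =>
      simp only [scanBuckets, Bool.false_eq_true, false_iff]
      rintro ⟨k, hk, hinf⟩
      exact spam_ne_nil k hk (List.eq_nil_of_infix_nil hinf)
  | cons c rest ih =>
      rw [scanBuckets, spamBuckets_getD, bucket_any spamKeywords spam_ne_nil]
      simp only [Bool.or_eq_true, List.any_eq_true, ih,
        PySem.Chars.startswith, List.isPrefixOf_iff_prefix, List.infix_cons_iff]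
      constructor
      · rintro (⟨k, hk, h⟩ | ⟨k, hk, h⟩)
        · exact ⟨k, hk, Or.inl h⟩
        · exact ⟨k, hk, Or.inr h⟩
      · rintro ⟨k, hk, h | h⟩
        · exact Or.inl ⟨k, hk, h⟩
        · exact Or.inr ⟨k, hk, h⟩

lemma scan_eq_any (s : List Char) :
    spamKeywords.any (fun k => PySem.Chars.isIn k s) = scanBuckets s := by
  rw [Bool.eq_iff_iff]
  simp only [List.any_eq_true, PySem.Chars.isIn_iff_infix, scanBuckets_iff s]

-- ===== VERDICT (by name: the statement is the Claim_ definition above) =====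
theorem heuristic_check_py_spec : Claim_equal_heuristic_check_py := by
  intro title description _
  show heuristic_check_py title description = heuristic_check_py_alt title description
  unfold heuristic_check_py heuristic_check_py_alt
  rw [guard_eq, guard_eq, scan_eq_any]
  by_cases h1 : PySem.Chars.strip title.toList = []
  · simp [h1]
  · by_cases h2 : PySem.Chars.strip description.toList = []
    · simp [h1, h2]
    · cases hs : scanBuckets (PySem.Chars.lower (title.toList ++ ' ' :: description.toList)) <;>
        simp [h1, h2]
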